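-- pv_equiv track=rewrite | github.com/jaredbancroft/aoc2022 | days/day6.py | detect_distinct
-- ===== SOURCE A (Python) =====
-- START_OF_PACKET = 4
--
-- START_OF_MESSAGE = 14
--
-- def detect_distinct(line: str, mode: str = "packet") -> int:
--     """
--     Do all the stuff
--     """
--     subroutine: set = set()
--
--     if mode == "packet":
--         terminator = START_OF_PACKET
--     elif mode == "message":
--         terminator = START_OF_MESSAGE
--     else:
--         return -2
--
--     for i in range(0, len(line)):
--         for j in range(i, len(line)):
--             if line[j] not in subroutine:
--                 subroutine.add(line[j])
--                 if len(subroutine) == terminator: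
--                     return j + 1
--             else:
--                 subroutine.clear()
--                 break
--
--     return -1
-- ===== SOURCE B (Python) =====
-- def detect_distinct(line: str, mode: str = "packet") -> int:
--     if mode == "packet":
--         terminator = 4
--     elif mode == "message":
--         terminator = 14
--     else:
--         return -2
--     last_seen = {}
--     start = 0
--     for r, c in enumerate(line):
--         p = last_seen.get(c)
--         if p is not None and p >= start:
--             start = p + 1
--         last_seen[c] = r
--         if r - start + 1 == terminator:
--             return r + 1
--     return -1
-- ===== Notes on version B (the rewrite author's own statement) =====
-- stated objective: alternative
-- what changed: Replaced A's restart-from-each-index nested scan (rebuilding a character set from every start position) by a single left-to-right sliding-window pass that keeps a last-seen-index dict and a window-start pointer, returning when the window length reaches the terminator.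
import Mathlib
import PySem

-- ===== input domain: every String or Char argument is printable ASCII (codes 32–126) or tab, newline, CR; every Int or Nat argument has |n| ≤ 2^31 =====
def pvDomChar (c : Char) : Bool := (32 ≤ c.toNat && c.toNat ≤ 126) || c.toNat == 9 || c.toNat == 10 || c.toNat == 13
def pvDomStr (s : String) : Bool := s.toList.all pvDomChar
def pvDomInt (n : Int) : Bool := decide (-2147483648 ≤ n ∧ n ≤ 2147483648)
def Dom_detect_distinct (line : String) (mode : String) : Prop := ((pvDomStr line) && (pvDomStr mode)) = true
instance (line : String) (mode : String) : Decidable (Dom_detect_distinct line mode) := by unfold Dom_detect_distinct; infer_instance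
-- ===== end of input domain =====

-- B replaces A's restart-per-index nested scan by a single sliding-window pass (last-seen dict + start pointer): a different single-pass algorithm of the same observable behaviour.

-- ===== PORT A =====
-- inner loop: `for j in range(i, len(line))` over the suffix, carrying the set `subroutine`;
-- returns .inl (j+1) on success, .inr <set after the loop> otherwise (cleared on a duplicate).
def innerA (t : Nat) : PySem.Set Char → Nat → List Char → Sum Int (PySem.Set Char)
  | s, _, [] => Sum.inr s
  | s, j, c :: rest =>
    if s.contains c = false then
      if (PySem.Set.add s c).length = t then Sum.inl ((j : Int) + 1)
      else innerA t (PySem.Set.add s c) (j + 1) rest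
    else Sum.inr []           -- subroutine.clear(); break

-- outer loop: `for i in range(0, len(line))`; the set survives across iterations unless cleared.
def outerA (t : Nat) : PySem.Set Char → Nat → List Char → Int
  | _, _, [] => -1
  | s, i, c :: rest =>
    match innerA t s i (c :: rest) with
    | Sum.inl r => r
    | Sum.inr s' => outerA t s' (i + 1) rest

def detect_distinct (line : String) (mode : String) : Int :=
  if mode = "packet" then outerA 4 [] 0 line.toList
  else if mode = "message" then outerA 14 [] 0 line.toList
  else -2

-- ===== PORT B =====
-- single pass: for r, c in enumerate(line): bump `start` past the last occurrence of c, record c at r,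
-- succeed when the window [start, r] has length `terminator`.
def goB (t : Int) : PySem.Dict Char Int → Int → Nat → List Char → Int
  | _, _, _, [] => -1
  | last, start, r, c :: rest =>
    let start' : Int :=
      match last.get? c with
      | some p => if start ≤ p then p + 1 else start
      | none => start
    let last' := last.insert c (r : Int)
    if (r : Int) - start' + 1 = t then (r : Int) + 1
    else goB t last' start' (r + 1) rest

def detect_distinct_alt (line : String) (mode : String) : Int :=
  if mode = "packet" then goB 4 ∅ 0 0 line.toList
  else if mode = "message" then goB 14 ∅ 0 0 line.toList
  else -2

-- ===== PRECONDITION & SPEC =====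
def Spec_detect_distinct (line : String) (mode : String) (out : Int) : Prop := out = detect_distinct_alt line mode
instance (line : String) (mode : String) (out : Int) : Decidable (Spec_detect_distinct line mode out) := by unfold Spec_detect_distinct; infer_instance

-- ===== CLAIM (what is proved, stated in full; the proofs are below) =====
def Claim_equal_detect_distinct : Prop := ∀ (line : String) (mode : String), Dom_detect_distinct line mode → Spec_detect_distinct line mode (detect_distinct line mode)

-- ===== LEMMAS AND PROOFS =====

-- reference scan: first window start i' ≥ i whose next t characters are distinct; returns i' + t, else -1.
def specA (t : Nat) : Nat → List Char → Int
  | _, [] => -1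
  | i, c :: rest =>
    if t ≤ rest.length + 1 ∧ ((c :: rest).take t).Nodup then (i : Int) + (t : Int)
    else specA t (i + 1) rest

-- the dict B has built after reading the first r characters
def buildLast (L : List Char) : Nat → PySem.Dict Char Int
  | 0 => ∅
  | r + 1 => if h : r < L.length then (buildLast L r).insert L[r] (r : Int) else buildLast L r

-- membership in a window of L
lemma mem_wnd {L : List Char} {u k : Nat} {a : Char} :
    a ∈ (L.drop u).take k ↔ ∃ q, u ≤ q ∧ q < u + k ∧ L[q]? = some a := by
  rw [List.mem_iff_getElem?]
  constructor
  · rintro ⟨m, hm⟩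
    have hmk : m < k := by
      by_contra hk
      rw [List.getElem?_take] at hm
      simp at hm
      omega
    rw [List.getElem?_take_of_lt hmk, List.getElem?_drop] at hm
    exact ⟨u + m, by omega, by omega, hm⟩
  · rintro ⟨q, h1, h2, h3⟩
    refine ⟨q - u, ?_⟩
    rw [List.getElem?_take_of_lt (by omega), List.getElem?_drop]
    rwa [Nat.add_sub_cancel' h1]

lemma wnd_nodup_mono {L : List Char} {u k k' : Nat} (hk : k ≤ k')
    (h : ((L.drop u).take k').Nodup) : ((L.drop u).take k).Nodup := by
  have : (L.drop u).take k = ((L.drop u).take k').take k := by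
    rw [List.take_take, Nat.min_eq_left hk]
  rw [this]
  exact h.sublist (List.take_sublist _ _)

lemma wnd_snoc {L : List Char} {u k : Nat} (h : u + k < L.length) :
    (L.drop u).take (k + 1) = (L.drop u).take k ++ [L[u + k]] := by
  have hk : k < (L.drop u).length := by simp; omega
  rw [List.take_succ_eq_append_getElem hk]
  congr 2
  exact List.getElem_drop ..

lemma wnd_not_nodup_of_dup {L : List Char} {u k a b : Nat}
    (hu : u ≤ a) (hab : a < b) (hb : b < u + k) (hbL : b < L.length)
    (he : L[a]? = L[b]?) : ¬ ((L.drop u).take k).Nodup := by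
  intro hn
  have haL : a < L.length := by omega
  have h1 : ((L.drop u).take k)[a - u]? = some L[a] := by
    rw [List.getElem?_take_of_lt (by omega), List.getElem?_drop,
      Nat.add_sub_cancel' hu, List.getElem?_eq_getElem haL]
  have h2 : ((L.drop u).take k)[b - u]? = some L[b] := by
    rw [List.getElem?_take_of_lt (by omega), List.getElem?_drop,
      Nat.add_sub_cancel' (by omega : u ≤ b), List.getElem?_eq_getElem hbL]
  have hv : L[a] = L[b] := by
    rw [List.getElem?_eq_getElem haL, List.getElem?_eq_getElem hbL] at he
    exact Option.some_injective _ he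
  rw [hv, ← h2] at h1
  have := List.getElem?_inj (xs := (L.drop u).take k) (by
    simp only [List.length_take, List.length_drop]
    omega) hn h1
  omega

lemma buildLast_get_some {L : List Char} {c : Char} :
    ∀ {r : Nat} {p : Int}, r ≤ L.length → (buildLast L r).get? c = some p →
    ∃ pn : Nat, p = (pn : Int) ∧ pn < r ∧ L[pn]? = some c ∧
      ∀ q, pn < q → q < r → L[q]? ≠ some c := by
  intro r
  induction r with
  | zero => intro p _ h; simp [buildLast, PySem.Dict.get?, EmptyCollection.emptyCollection, PySem.Dict.empty] at h
  | succ r ih =>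
    intro p hr h
    have hrL : r < L.length := hr
    rw [buildLast, dif_pos hrL, PySem.Dict.get?_insert] at h
    by_cases hc : c = L[r]
    · rw [if_pos hc] at h
      refine ⟨r, (Option.some_injective _ h).symm, by omega, ?_, by intro q h1 h2; omega⟩
      rw [List.getElem?_eq_getElem hrL, hc]
    · rw [if_neg hc] at h
      obtain ⟨pn, h1, h2, h3, h4⟩ := ih (by omega) h
      refine ⟨pn, h1, by omega, h3, ?_⟩
      intro q hq1 hq2 hq3
      rcases Nat.lt_or_ge q r with hlt | hge
      · exact h4 q hq1 hlt hq3
      · have : q = r := by omega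
        subst this
        rw [List.getElem?_eq_getElem hrL] at hq3
        exact hc (Option.some_injective _ hq3).symm

lemma buildLast_get_none {L : List Char} {c : Char} :
    ∀ {r : Nat}, r ≤ L.length → (buildLast L r).get? c = none →
    ∀ q, q < r → L[q]? ≠ some c := by
  intro r
  induction r with
  | zero => intro _ _ q hq; omega
  | succ r ih =>
    intro hr h q hq hq3
    have hrL : r < L.length := hr
    rw [buildLast, dif_pos hrL, PySem.Dict.get?_insert] at h
    by_cases hc : c = L[r]
    · rw [if_pos hc] at h; exact (Option.some_ne_none _ h).elim
    · rw [if_neg hc] at h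
      rcases Nat.lt_or_ge q r with hlt | hge
      · exact ih (by omega) h q hlt hq3
      · have : q = r := by omega
        subst this
        rw [List.getElem?_eq_getElem hrL] at hq3
        exact hc (Option.some_injective _ hq3).symm

-- ===== A-side lemmas =====

lemma innerA_success {t : Nat} :
    ∀ (xs : List Char) (s : List Char) (j : Nat), s.length < t →
      (s ++ xs.take (t - s.length)).Nodup → t - s.length ≤ xs.length →
      innerA t s j xs = Sum.inl ((j : Int) + ((t - s.length : Nat) : Int)) := by
  intro xs
  induction xs with
  | nil => intro s j h1 h2 h3; simp at h3; omega
  | cons c rest ih =>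
    intro s j h1 h2 h3
    have htake : (c :: rest).take (t - s.length) = c :: rest.take (t - s.length - 1) := by
      obtain ⟨d, hd⟩ : ∃ d, t - s.length = d + 1 := ⟨t - s.length - 1, by omega⟩
      rw [hd, List.take_succ_cons]
      simp
    rw [htake] at h2
    have hcs : c ∉ s := by
      intro hmem
      have : ¬ (s ++ c :: rest.take (t - s.length - 1)).Nodup := by
        intro hn
        have := List.disjoint_of_nodup_append hn
        exact this hmem (List.mem_cons_self ..)
      exact this h2
    have hcont : PySem.Set.contains s c = false := by simp [PySem.Set.contains]; exact hcs
    have hadd : PySem.Set.add s c = s ++ [c] := by simp [PySem.Set.add, PySem.Set.contains, hcs]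
    rw [innerA, if_pos hcont, hadd]
    by_cases hlen : (s ++ [c]).length = t
    · rw [if_pos hlen]
      have : t - s.length = 1 := by simp at hlen; omega
      rw [this]
      norm_num
    · rw [if_neg hlen]
      have h1' : (s ++ [c]).length < t := by simp only [List.length_append, List.length_cons, List.length_nil] at hlen ⊢; omega
      have h2' : ((s ++ [c]) ++ rest.take (t - (s ++ [c]).length)).Nodup := by
        rw [List.append_cons] at h2
        simpa using h2
      have h3' : t - (s ++ [c]).length ≤ rest.length := by simp at h3 ⊢; omega
      rw [ih (s ++ [c]) (j + 1) h1' h2' h3']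
      congr 1
      simp
      omega

lemma innerA_dup {t : Nat} :
    ∀ (xs : List Char) (s : List Char) (j : Nat), s.length < t → s.Nodup →
      ¬ (s ++ xs.take (t - s.length)).Nodup →
      innerA t s j xs = Sum.inr [] := by
  intro xs
  induction xs with
  | nil => intro s j h1 hs h2; simp at h2; exact absurd hs h2
  | cons c rest ih =>
    intro s j h1 hs h2
    have htake : (c :: rest).take (t - s.length) = c :: rest.take (t - s.length - 1) := by
      obtain ⟨d, hd⟩ : ∃ d, t - s.length = d + 1 := ⟨t - s.length - 1, by omega⟩
      rw [hd, List.take_succ_cons]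
      simp
    rw [htake] at h2
    by_cases hcs : c ∈ s
    · rw [innerA, if_neg (by simp [PySem.Set.contains, hcs])]
    · have hcont : PySem.Set.contains s c = false := by simp [PySem.Set.contains]; exact hcs
      have hadd : PySem.Set.add s c = s ++ [c] := by simp [PySem.Set.add, PySem.Set.contains, hcs]
      rw [innerA, if_pos hcont, hadd]
      by_cases hlen : (s ++ [c]).length = t
      · exfalso
        have ht1 : t - s.length - 1 = 0 := by simp at hlen; omega
        rw [ht1, List.take_zero] at h2
        exact h2 (by simp [List.nodup_append, hs]; intro a ha he; exact hcs (he ▸ ha))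
      · rw [if_neg hlen]
        have h1' : (s ++ [c]).length < t := by simp only [List.length_append, List.length_cons, List.length_nil] at hlen ⊢; omega
        have hs' : (s ++ [c]).Nodup := by
          rw [List.nodup_append]
          exact ⟨hs, List.nodup_singleton c, fun a ha b hb => by simp at hb; subst hb; exact fun he => hcs (he ▸ ha)⟩
        have h2' : ¬ ((s ++ [c]) ++ rest.take (t - (s ++ [c]).length)).Nodup := by
          rw [List.append_cons] at h2
          simpa using h2
        exact ih (s ++ [c]) (j + 1) h1' hs' h2'

lemma innerA_short {t : Nat} :
    ∀ (xs : List Char) (s : List Char) (j : Nat), s.Nodup → (s ++ xs).Nodup →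
      s.length + xs.length < t →
      innerA t s j xs = Sum.inr (s ++ xs) := by
  intro xs
  induction xs with
  | nil => intro s j _ _ _; simp [innerA]
  | cons c rest ih =>
    intro s j hs h2 h3
    have hcs : c ∉ s := by
      intro hmem
      exact (List.disjoint_of_nodup_append h2) hmem (List.mem_cons_self ..)
    have hcont : PySem.Set.contains s c = false := by simp [PySem.Set.contains]; exact hcs
    have hadd : PySem.Set.add s c = s ++ [c] := by simp [PySem.Set.add, PySem.Set.contains, hcs]
    rw [innerA, if_pos hcont, hadd]
    have hlen : (s ++ [c]).length ≠ t := by simp only [List.length_append, List.length_cons, List.length_nil] at h3 ⊢; omega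
    rw [if_neg hlen]
    have h2' : ((s ++ [c]) ++ rest).Nodup := by rw [← List.append_cons]; exact h2
    have hs' : (s ++ [c]).Nodup := by
      rw [List.nodup_append]
      exact ⟨hs, List.nodup_singleton c, fun a ha b hb => by simp at hb; subst hb; exact fun he => hcs (he ▸ ha)⟩
    rw [ih (s ++ [c]) (j + 1) hs' h2'
      (by simp only [List.length_append, List.length_cons, List.length_nil] at h3 ⊢; omega)]
    simp

lemma specA_short {t : Nat} : ∀ (xs : List Char) (i : Nat), xs.length < t →
    specA t i xs = -1 := by
  intro xs
  induction xs with
  | nil => intro i _; rfl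
  | cons c rest ih =>
    intro i h
    rw [specA, if_neg (by simp at h ⊢; omega)]
    exact ih (i + 1) (by simp at h ⊢; omega)

-- once every remaining suffix is shorter than t, the outer loop returns -1 (whatever set it carries,
-- provided the carried set contains the whole suffix, as happens in A's execution)
lemma outerA_short {t : Nat} :
    ∀ (m : Nat) (xs : List Char), xs.length = m → xs.length < t → xs.Nodup →
      (∀ i, outerA t [] i xs = -1) ∧
      (∀ i s, (∀ c ∈ xs, c ∈ s) → outerA t s i xs = -1) := by
  intro m
  induction m using Nat.strong_induction_on with
  | _ m ih =>
    intro xs hm hlt hnd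
    match xs with
    | [] => exact ⟨fun i => rfl, fun i s _ => rfl⟩
    | c :: rest =>
      have hrest : rest.length < m := by simp at hm; omega
      have hrnd : rest.Nodup := hnd.of_cons
      constructor
      · intro i
        rw [outerA, innerA_short (c :: rest) [] i List.nodup_nil (by simpa using hnd)
          (by simpa using hlt)]
        simp only [List.nil_append]
        exact ((ih rest.length hrest rest rfl (by omega) hrnd).2) (i+1) (c :: rest)
          (fun d hd => List.mem_cons_of_mem _ hd)
      · intro i s hsub
        rw [outerA, innerA, if_neg (by simp [PySem.Set.contains, hsub c (List.mem_cons_self ..)])]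
        exact ((ih rest.length hrest rest rfl (by omega) hrnd).1) (i+1)

lemma outerA_eq_specA {t : Nat} (ht : 1 ≤ t) :
    ∀ (xs : List Char) (i : Nat), outerA t [] i xs = specA t i xs := by
  intro xs
  induction xs with
  | nil => intro i; rfl
  | cons c rest ih =>
    intro i
    by_cases hnd : ((c :: rest).take t).Nodup
    · by_cases hlen : t ≤ rest.length + 1
      · rw [outerA, innerA_success (c :: rest) [] i (by simp; omega) (by simpa using hnd)
          (by simp only [List.length_nil, List.length_cons, Nat.sub_zero]; omega)]
        rw [specA, if_pos ⟨hlen, hnd⟩]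
        norm_num
      · have hxs : (c :: rest).length < t := by simp; omega
        have hnd' : (c :: rest).Nodup := by
          rw [List.take_of_length_le (by omega)] at hnd; exact hnd
        rw [outerA, innerA_short (c :: rest) [] i List.nodup_nil (by simpa using hnd')
          (by simpa using hxs)]
        simp only [List.nil_append]
        rw [(outerA_short rest.length rest rfl (by simp at hxs; omega) hnd'.of_cons).2 (i+1)
          (c :: rest) (fun d hd => List.mem_cons_of_mem _ hd)]
        rw [specA, if_neg (by tauto), specA_short rest (i+1) (by simp at hxs; omega)]
    · rw [outerA, innerA_dup (c :: rest) [] i (by simp; omega) List.nodup_nil (by simpa using hnd)]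
      rw [specA, if_neg (by tauto)]
      exact ih (i + 1)


lemma wnd_min_extend {L : List Char} {s r : Nat}
    (hmin : ∀ u, u < s → ¬ ((L.drop u).take (r - u)).Nodup) :
    ∀ u, u < s → ¬ ((L.drop u).take (r + 1 - u)).Nodup :=
  fun u hu hnd => hmin u hu (wnd_nodup_mono (by omega) hnd)

lemma wnd_grow {L : List Char} {s r : Nat} (hsr : s ≤ r) (hrL : r < L.length)
    (hnd : ((L.drop s).take (r - s)).Nodup)
    (hnew : ∀ q, s ≤ q → q < r → L[q]? ≠ L[r]?) :
    ((L.drop s).take (r + 1 - s)).Nodup := by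
  rw [show r + 1 - s = (r - s) + 1 from by omega, wnd_snoc (by omega)]
  rw [List.nodup_append]
  refine ⟨hnd, List.nodup_singleton _, fun a ha b hb => by
    simp at hb; subst hb; intro he
    obtain ⟨q, hq1, hq2, hq3⟩ := mem_wnd.mp ha
    refine hnew q hq1 (by omega) ?_
    rw [hq3, List.getElem?_eq_getElem hrL, he]
    simp only [show s + (r - s) = r from by omega]⟩

-- ===== B-side main lemma =====

lemma goB_eq_specA {t : Nat} (ht : 1 ≤ t) (L : List Char) :
    ∀ (xs : List Char) (r s : Nat), L.drop r = xs →
      s ≤ r →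
      ((L.drop s).take (r - s)).Nodup →
      (∀ u, u < s → ¬ ((L.drop u).take (r - u)).Nodup) →
      r - s < t →
      goB (t : Int) (buildLast L r) (s : Int) r xs = specA t (r + 1 - t) (L.drop (r + 1 - t)) := by
  intro xs
  induction xs with
  | nil =>
    intro r s hdrop _ _ _ _
    have hn : L.length ≤ r := by
      have := congrArg List.length hdrop; simp at this; omega
    rw [goB]
    exact (specA_short _ _ (by simp only [List.length_drop]; omega)).symm
  | cons c rest ih =>
    intro r s hdrop hsr hnd hmin hlt
    have hrL : r < L.length := by
      have := congrArg List.length hdrop; simp at this; omega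
    have hLr : L[r]? = some c := by
      have h0 : (L.drop r)[0]? = some c := by rw [hdrop]; rfl
      rwa [List.getElem?_drop, Nat.add_zero] at h0
    have hLrg : L[r] = c := by
      rw [List.getElem?_eq_getElem hrL] at hLr
      exact Option.some_injective _ hLr
    have hrest : L.drop (r + 1) = rest := by
      have h1 : List.drop 1 (L.drop r) = rest := by rw [hdrop]; rfl
      rwa [List.drop_drop] at h1
    have hbl : (buildLast L r).insert c ((r : Nat) : Int) = buildLast L (r + 1) := by
      rw [buildLast, dif_pos hrL, hLrg]
    suffices H : ∀ s1 : Nat, s ≤ s1 → s1 ≤ r →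
        ((L.drop s1).take (r + 1 - s1)).Nodup →
        (∀ u, u < s1 → ¬ ((L.drop u).take (r + 1 - u)).Nodup) →
        (if (r : Int) - (s1 : Int) + 1 = (t : Int) then (r : Int) + 1
         else goB (t : Int) ((buildLast L r).insert c ((r : Nat) : Int)) ((s1 : Nat) : Int) (r + 1) rest)
        = specA t (r + 1 - t) (L.drop (r + 1 - t)) by
      rw [goB]
      rcases hget : (buildLast L r).get? c with _ | p
      · simp only [hget]
        refine H s le_rfl hsr ?_ (wnd_min_extend hmin)
        refine wnd_grow hsr hrL hnd (fun q hq1 hq2 hqe => ?_)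
        exact buildLast_get_none (le_of_lt hrL) hget q hq2 (by rw [hqe, hLr])
      · obtain ⟨pn, hpn, hpr, hLp, hlast⟩ := buildLast_get_some (le_of_lt hrL) hget
        subst hpn
        simp only [hget]
        by_cases hps : ((s : Nat) : Int) ≤ (pn : Int)
        · rw [if_pos hps]
          have hsp : s ≤ pn := by exact_mod_cast hps
          rw [show ((pn : Nat) : Int) + 1 = (((pn + 1 : Nat)) : Int) from by push_cast; ring]
          refine H (pn + 1) (by omega) (by omega) ?_ ?_
          · refine wnd_grow (by omega) hrL ?_ (fun q hq1 hq2 hqe => ?_)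
            · have hpre : List.drop (pn + 1 - s) ((L.drop s).take (r - s)) =
                  (L.drop (pn + 1)).take (r - (pn + 1)) := by
                rw [List.drop_take, List.drop_drop, show s + (pn + 1 - s) = pn + 1 from by omega,
                  show r - s - (pn + 1 - s) = r - (pn + 1) from by omega]
              rw [← hpre]
              exact hnd.sublist (List.drop_sublist ..)
            · exact hlast q (by omega) hq2 (by rw [hqe, hLr])
          · intro u hu
            exact wnd_not_nodup_of_dup (by omega) hpr (by omega) hrL (by rw [hLp, hLr])
        · rw [if_neg hps]
          have hsp : pn < s := by omega
          refine H s le_rfl hsr ?_ (wnd_min_extend hmin)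
          refine wnd_grow hsr hrL hnd (fun q hq1 hq2 hqe => ?_)
          have hqc : L[q]? = some c := by rw [hqe, hLr]
          rcases Nat.lt_or_ge pn q with hlt' | hge
          · exact hlast q hlt' hq2 hqc
          · omega
    intro s1 hs1l hs1r hnd1 hmin1
    by_cases hchk : (r : Int) - (s1 : Int) + 1 = (t : Int)
    · rw [if_pos hchk]
      have hi : r + 1 - t = s1 := by omega
      rw [hi]
      obtain ⟨d, ds, hdd⟩ : ∃ d ds, L.drop s1 = d :: ds := by
        cases hD : L.drop s1 with
        | nil => exact absurd (congrArg List.length hD) (by simp; omega)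
        | cons d ds => exact ⟨d, ds, rfl⟩
      have hlen : ds.length + 1 = L.length - s1 := by
        have := congrArg List.length hdd; simpa using this.symm
      rw [hdd, specA, if_pos ⟨by omega, by rw [← hdd, show t = r + 1 - s1 from by omega]; exact hnd1⟩]
      omega
    · rw [if_neg hchk]
      have hlt1 : r + 1 - s1 < t := by omega
      rw [hbl, ih (r + 1) s1 hrest (by omega) hnd1 hmin1 (by omega)]
      by_cases hT : t ≤ r + 1
      · have hi : r + 1 - t < L.length := by omega
        obtain ⟨e, es, hee⟩ : ∃ e es, L.drop (r + 1 - t) = e :: es := by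
          cases hD : L.drop (r + 1 - t) with
          | nil => exact absurd (congrArg List.length hD) (by simp; omega)
          | cons e es => exact ⟨e, es, rfl⟩
        have hes : es = L.drop (r + 1 + 1 - t) := by
          have h1 : List.drop 1 (L.drop (r + 1 - t)) = es := by rw [hee]; rfl
          rw [List.drop_drop] at h1
          rw [← h1]
          congr 1
          omega
        conv_rhs => rw [hee, specA]
        rw [if_neg ?_]
        · rw [show r + 1 - t + 1 = r + 1 + 1 - t from by omega, ← hes]
        · rintro ⟨_, hnd2⟩
          have hW : ((L.drop (r + 1 - t)).take t).Nodup := by rw [hee]; exact hnd2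
          have hs1le : s1 ≤ r + 1 - t := by
            by_contra hgt
            refine hmin1 (r + 1 - t) (by omega) ?_
            rwa [show r + 1 - (r + 1 - t) = t from by omega]
          omega
      · rw [show r + 1 - t = 0 from by omega, show r + 1 + 1 - t = 0 from by omega]

lemma both_eq (t : Nat) (ht : 1 ≤ t) (L : List Char) :
    outerA t [] 0 L = goB (t : Int) ∅ 0 0 L := by
  have h := goB_eq_specA ht L L 0 0 (by simp) (Nat.le_refl 0) (by simp)
    (fun u hu => absurd hu (Nat.not_lt_zero u)) (by omega)
  simp only [Nat.cast_zero, show (0 : Nat) + 1 - t = 0 from by omega, List.drop_zero] at h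
  rw [outerA_eq_specA ht L 0, ← h]
  rfl

-- ===== VERDICT (by name: the statement is the Claim_ definition above) =====
theorem detect_distinct_spec : Claim_equal_detect_distinct := by
  intro line mode _
  unfold Spec_detect_distinct detect_distinct detect_distinct_alt
  by_cases h1 : mode = "packet"
  · simpa [h1] using both_eq 4 (by norm_num) line.toList
  · by_cases h2 : mode = "message"
    · simpa [h1, h2] using both_eq 14 (by norm_num) line.toList
    · simp [h1, h2]
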